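-- pv_equiv track=rewrite | github.com/daheitu/pFind_data_post_analysis.github.io | dsso_ms3_ions/readMS3info.py | stacMS2MS3
-- ===== SOURCE A (Python) =====
-- def stacMS2MS3(ms2TriggerMS3dic):
--     repDic = {}
--     for ms2scan in ms2TriggerMS3dic:
--         pairState = ms2TriggerMS3dic[ms2scan][-1]
--         if pairState == "None":
--             state = "None"
--         elif ";" not in pairState:
--             state = "onePair"
--         else:
--             state = "twoPair"
--         numOFMS3 = len(ms2TriggerMS3dic[ms2scan]) -2
--         if state not in repDic:
--             repDic[state] = {}
--             if  numOFMS3 not in repDic[state]: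
--                 repDic[state][numOFMS3] = 1
--             else:
--                 repDic[state][numOFMS3] += 1
--         else:
--             if  numOFMS3 not in repDic[state]:
--                 repDic[state][numOFMS3] = 1
--             else:
--                 repDic[state][numOFMS3] += 1
--
--     return repDic
-- ===== SOURCE B (Python) =====
-- def stacMS2MS3(ms2TriggerMS3dic):
--     def classify(v):
--         last = v[-1]
--         state = "None" if last == "None" else ("onePair" if ";" not in last else "twoPair")
--         return (state, len(v) - 2)
--     ps = [classify(v) for v in ms2TriggerMS3dic.values()]
--     states = list(dict.fromkeys(s for s, _ in ps))
--     return {s: {n: ps.count((s, n))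
--                 for n in dict.fromkeys(n2 for s2, n2 in ps if s2 == s)}
--             for s in states}
-- ===== Notes on version B (the rewrite author's own statement) =====
-- stated objective: alternative
-- what changed: A grows a nested dict-of-dicts incrementally with contains-checks inside one loop; B first classifies every value into a flat (state, numOFMS3) pair list, then builds the nested result by grouped comprehensions (ordered dedup of states, ordered dedup of that state's counts, and a count over the pair list).
import Mathlib
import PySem

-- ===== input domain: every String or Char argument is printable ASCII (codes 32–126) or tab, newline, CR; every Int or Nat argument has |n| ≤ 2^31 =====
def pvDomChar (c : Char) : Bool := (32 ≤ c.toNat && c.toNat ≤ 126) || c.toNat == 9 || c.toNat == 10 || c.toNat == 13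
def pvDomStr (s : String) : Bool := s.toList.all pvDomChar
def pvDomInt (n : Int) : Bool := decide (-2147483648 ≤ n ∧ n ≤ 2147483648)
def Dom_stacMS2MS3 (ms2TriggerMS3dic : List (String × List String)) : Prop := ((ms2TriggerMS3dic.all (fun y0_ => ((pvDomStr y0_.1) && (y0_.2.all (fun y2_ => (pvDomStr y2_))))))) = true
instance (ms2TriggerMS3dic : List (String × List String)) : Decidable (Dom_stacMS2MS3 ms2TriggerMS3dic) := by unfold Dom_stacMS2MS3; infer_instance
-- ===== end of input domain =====

-- B replaces A's incremental nested-dict building by a classify-then-group pipeline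
-- (classified pair list, ordered dedup of states / MS3-counts, counting comprehension); objective: alternative, not faster.

-- ===== PORT A =====
def stacMS2MS3 (ms2TriggerMS3dic : List (String × List String)) : List (String × List (Int × Int)) :=
  let d := PySem.Dict.ofList ms2TriggerMS3dic
  let repDic :=
    d.keys.foldl (fun repDic ms2scan =>
      let pairState := PySem.List.pyGetD (d.getD ms2scan []) (-1) ""
      let state := if pairState == "None" then "None"
                   else if PySem.Str.isIn ";" pairState = false then "onePair"
                   else "twoPair"
      let numOFMS3 : Int := PySem.List.len (d.getD ms2scan []) - 2
      if repDic.contains state = false then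
        let repDic := repDic.insert state PySem.Dict.empty
        if (repDic.getD state PySem.Dict.empty).contains numOFMS3 = false then
          repDic.insert state ((repDic.getD state PySem.Dict.empty).insert numOFMS3 1)
        else
          repDic.insert state ((repDic.getD state PySem.Dict.empty).insert numOFMS3
            ((repDic.getD state PySem.Dict.empty).getD numOFMS3 0 + 1))
      else
        if (repDic.getD state PySem.Dict.empty).contains numOFMS3 = false then
          repDic.insert state ((repDic.getD state PySem.Dict.empty).insert numOFMS3 1)
        else
          repDic.insert state ((repDic.getD state PySem.Dict.empty).insert numOFMS3
            ((repDic.getD state PySem.Dict.empty).getD numOFMS3 0 + 1)))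
      PySem.Dict.empty
  repDic.items.map (fun q => (q.1, q.2.items))

-- ===== PORT B =====
-- Source B's helper classify(v)
def stacClassify (v : List String) : String × Int :=
  let last := PySem.List.pyGetD v (-1) ""
  let state := if last == "None" then "None"
               else if PySem.Str.isIn ";" last = false then "onePair"
               else "twoPair"
  (state, PySem.List.len v - 2)

def stacMS2MS3_alt (ms2TriggerMS3dic : List (String × List String)) : List (String × List (Int × Int)) :=
  let ps := (PySem.Dict.ofList ms2TriggerMS3dic).values.map stacClassify
  let states := PySem.List.dedup (ps.map Prod.fst)
  states.map (fun s => (s,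
    (PySem.List.dedup (ps.filterMap (fun p => if p.1 == s then some p.2 else none))).map
      (fun n => (n, (PySem.List.count ps (s, n) : Int)))))

-- ===== PRECONDITION & SPEC =====
-- Pre_ excludes exactly the inputs on which Python A raises IndexError: a dict value that is the empty list
-- (value[-1] fails there; B's Python raises on the same inputs).
def Pre_stacMS2MS3 (ms2TriggerMS3dic : List (String × List String)) : Prop :=
  ((PySem.Dict.ofList ms2TriggerMS3dic).values.all (fun v => !v.isEmpty)) = true
instance (ms2TriggerMS3dic : List (String × List String)) : Decidable (Pre_stacMS2MS3 ms2TriggerMS3dic) := by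
  unfold Pre_stacMS2MS3; infer_instance

def pvWitness_stacMS2MS3 : (List (String × List String)) := [("s1", ["a", "b", "None"]), ("s2", ["x", "y", "z", "a;b"])]

def Spec_stacMS2MS3 (ms2TriggerMS3dic : List (String × List String)) (out : List (String × List (Int × Int))) : Prop := out = stacMS2MS3_alt ms2TriggerMS3dic
instance (ms2TriggerMS3dic : List (String × List String)) (out : List (String × List (Int × Int))) : Decidable (Spec_stacMS2MS3 ms2TriggerMS3dic out) := by unfold Spec_stacMS2MS3; infer_instance

-- ===== CLAIM (what is proved, stated in full; the proofs are below) =====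
def Claim_equal_stacMS2MS3 : Prop := ∀ (ms2TriggerMS3dic : List (String × List String)), Dom_stacMS2MS3 ms2TriggerMS3dic → Pre_stacMS2MS3 ms2TriggerMS3dic → Spec_stacMS2MS3 ms2TriggerMS3dic (stacMS2MS3 ms2TriggerMS3dic)

-- ===== LEMMAS AND PROOFS =====

-- A's loop body, as a function of the classified pair (state, numOFMS3)
def pvStep (repDic : PySem.Dict String (PySem.Dict Int Int)) (p : String × Int) : PySem.Dict String (PySem.Dict Int Int) :=
  if repDic.contains p.1 = false then
    let repDic := repDic.insert p.1 PySem.Dict.empty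
    if (repDic.getD p.1 PySem.Dict.empty).contains p.2 = false then
      repDic.insert p.1 ((repDic.getD p.1 PySem.Dict.empty).insert p.2 1)
    else
      repDic.insert p.1 ((repDic.getD p.1 PySem.Dict.empty).insert p.2
        ((repDic.getD p.1 PySem.Dict.empty).getD p.2 0 + 1))
  else
    if (repDic.getD p.1 PySem.Dict.empty).contains p.2 = false then
      repDic.insert p.1 ((repDic.getD p.1 PySem.Dict.empty).insert p.2 1)
    else
      repDic.insert p.1 ((repDic.getD p.1 PySem.Dict.empty).insert p.2
        ((repDic.getD p.1 PySem.Dict.empty).getD p.2 0 + 1))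

theorem pvStep_eq (d : PySem.Dict String (PySem.Dict Int Int)) (s : String) (n : Int) :
    pvStep d (s, n) = d.insert s ((d.getD s PySem.Dict.empty).insert n
      ((d.getD s PySem.Dict.empty).getD n 0 + 1)) := by
  by_cases hc : d.contains s = false
  · simp [pvStep, hc, PySem.Dict.contains_empty, PySem.Dict.getD_empty,
      PySem.Dict.getD_of_not_contains d PySem.Dict.empty hc,
      PySem.Dict.insert_insert_self]
  · rw [Bool.not_eq_false] at hc
    by_cases hn : (d.getD s PySem.Dict.empty).contains n = false
    · simp [pvStep, hc, hn, PySem.Dict.getD_of_not_contains _ (0 : Int) hn]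
    · simp [pvStep, hc, hn]

def pvNums (ps : List (String × Int)) (s : String) : List Int :=
  ps.filterMap (fun p => if p.1 == s then some p.2 else none)

theorem pvKeys (ps : List (String × Int)) :
    (ps.foldl pvStep PySem.Dict.empty).keys = PySem.Set.ofList (ps.map Prod.fst) := by
  induction ps using List.reverseRecOn with
  | nil => simp [PySem.Dict.keys_empty, PySem.Set.ofList_nil]
  | append_singleton ps p ih =>
    rw [List.foldl_append, List.foldl_cons, List.foldl_nil, pvStep_eq _ p.1 p.2,
        List.map_append]
    have : List.map Prod.fst [p] = [p.1] := rfl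
    rw [this, PySem.Set.ofList_append_singleton]
    by_cases hm : p.1 ∈ ps.map Prod.fst
    · rw [PySem.Dict.keys_insert_of_contains _ _
        (by rw [PySem.Dict.contains_eq_decide_mem_keys, ih]; simpa [PySem.Set.mem_ofList] using hm),
        ih, PySem.Set.add_of_mem (by simpa [PySem.Set.mem_ofList] using hm)]
    · rw [PySem.Dict.keys_insert_of_not_contains _ _
        (by rw [PySem.Dict.contains_eq_decide_mem_keys, ih]; simpa [PySem.Set.mem_ofList] using hm),
        ih, PySem.Set.add_of_not_mem (by simpa [PySem.Set.mem_ofList] using hm)]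

theorem pvInnerKeys (ps : List (String × Int)) (s : String) :
    ((ps.foldl pvStep PySem.Dict.empty).getD s PySem.Dict.empty).keys = PySem.Set.ofList (pvNums ps s) := by
  induction ps using List.reverseRecOn with
  | nil => simp [PySem.Dict.getD_empty, PySem.Dict.keys_empty, pvNums, PySem.Set.ofList_nil]
  | append_singleton ps p ih =>
    obtain ⟨a, b⟩ := p
    rw [List.foldl_append, List.foldl_cons, List.foldl_nil, pvStep_eq _ a b,
        PySem.Dict.getD_insert]
    have hnums : pvNums (ps ++ [(a, b)]) s
        = pvNums ps s ++ (if a == s then [b] else []) := by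
      simp only [pvNums, List.filterMap_append]
      congr 1
      by_cases h : a = s <;> simp [h]
    by_cases hs : s = a
    · subst hs
      rw [if_pos rfl, hnums]
      simp only [beq_self_eq_true, if_true]
      rw [PySem.Set.ofList_append_singleton]
      by_cases hb : b ∈ pvNums ps s
      · rw [PySem.Dict.keys_insert_of_contains _ _
          (by rw [PySem.Dict.contains_eq_decide_mem_keys, ih]; simpa [PySem.Set.mem_ofList] using hb),
          ih, PySem.Set.add_of_mem (by simpa [PySem.Set.mem_ofList] using hb)]
      · rw [PySem.Dict.keys_insert_of_not_contains _ _
          (by rw [PySem.Dict.contains_eq_decide_mem_keys, ih]; simpa [PySem.Set.mem_ofList] using hb),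
          ih, PySem.Set.add_of_not_mem (by simpa [PySem.Set.mem_ofList] using hb)]
    · rw [if_neg hs, hnums, if_neg (by simpa using fun h => hs h.symm)]
      simpa using ih

theorem pvInnerGetD (ps : List (String × Int)) (s : String) (n : Int) :
    (((ps.foldl pvStep PySem.Dict.empty).getD s PySem.Dict.empty).getD n 0) = (ps.count (s, n) : Int) := by
  induction ps using List.reverseRecOn with
  | nil => simp [PySem.Dict.getD_empty]
  | append_singleton ps p ih =>
    obtain ⟨a, b⟩ := p
    rw [List.foldl_append, List.foldl_cons, List.foldl_nil, pvStep_eq _ a b,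
        PySem.Dict.getD_insert, List.count_append]
    by_cases hs : s = a
    · subst hs
      rw [if_pos rfl, PySem.Dict.getD_insert]
      by_cases hn : n = b
      · subst hn
        simp [ih]
      · rw [if_neg hn, ih]
        simp [Ne.symm hn]
    · rw [if_neg hs, ih]
      have : List.count (s, n) [(a, b)] = 0 := by
        simp [List.count_cons]
        intro h
        exact absurd h.symm hs
      simp [this]

theorem pvMain (ps : List (String × Int)) :
    ((ps.foldl pvStep PySem.Dict.empty).items.map (fun q => (q.1, q.2.items)))
      = (PySem.Set.ofList (ps.map Prod.fst)).map (fun s => (s,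
          (PySem.Set.ofList (pvNums ps s)).map (fun n => (n, (ps.count (s, n) : Int))))) := by
  have hnd : (ps.foldl pvStep PySem.Dict.empty).keys.Nodup := by
    rw [pvKeys]; exact PySem.Set.nodup_ofList _
  rw [PySem.Dict.items_eq_map_keys _ hnd PySem.Dict.empty, List.map_map, pvKeys]
  refine List.map_congr_left (fun s _ => ?_)
  simp only [Function.comp]
  have hnd2 : ((ps.foldl pvStep PySem.Dict.empty).getD s PySem.Dict.empty).keys.Nodup := by
    rw [pvInnerKeys]; exact PySem.Set.nodup_ofList _
  rw [PySem.Dict.items_eq_map_keys _ hnd2 (0 : Int), pvInnerKeys]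
  refine Prod.ext rfl ?_
  refine List.map_congr_left (fun n _ => ?_)
  rw [pvInnerGetD]

-- ===== VERDICT (by name: the statement is the Claim_ definition above) =====
theorem stacMS2MS3_spec : Claim_equal_stacMS2MS3 := by
  intro l _ _
  unfold Spec_stacMS2MS3
  have hA : stacMS2MS3 l
      = (((PySem.Dict.ofList l).keys.foldl
          (fun r k => pvStep r (stacClassify ((PySem.Dict.ofList l).getD k [])))
          PySem.Dict.empty).items.map (fun q => (q.1, q.2.items))) := rfl
  have hv : (PySem.Dict.ofList l).values.map stacClassify
      = (PySem.Dict.ofList l).keys.map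
          (fun k => stacClassify ((PySem.Dict.ofList l).getD k [])) := by
    rw [PySem.Dict.values_eq_map_keys _ (PySem.Dict.nodup_keys_ofList l) ([] : List String),
        List.map_map]
    simp [Function.comp]
  have hB : ((PySem.Dict.ofList l).keys.foldl
        (fun r k => pvStep r (stacClassify ((PySem.Dict.ofList l).getD k [])))
        PySem.Dict.empty)
      = ((PySem.Dict.ofList l).values.map stacClassify).foldl pvStep PySem.Dict.empty := by
    rw [hv, List.foldl_map]
  rw [hA, hB, pvMain]
  unfold stacMS2MS3_alt
  simp only [PySem.List.dedup_eq_ofList, PySem.List.count_eq, pvNums]
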